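-- pv_equiv track=rewrite | github.com/TYDTYD/Baekjoon-OJ | 18235번.py | bfs5
-- ===== SOURCE A (Python) =====
-- from collections import deque
--
-- def bfs5(n,a):
--     queue=deque([(a,1)])
--     visited5=[[False for i in range(n+1)] for j in range(20)]
--     while queue:
--         a,count=queue.popleft()
--         if count==20:
--             continue
--         graph=[a+(2**(count-1)),a-(2**(count-1))] # 오리 위치
--         for i in range(len(graph)):
--             if i==0:
--                 if graph[i]<=n and graph[i]>0:
--                     visited5[count][graph[i]]=True
--                     queue.append((graph[i],count+1))
--             elif i==1:
--                 if graph[i]<=n and graph[i]>0: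
--                     visited5[count][graph[i]]=True
--                     queue.append((graph[i],count+1))
--     return visited5
-- ===== SOURCE B (Python) =====
-- def bfs5(n, a):
--     rows = [[False] * (n + 1)]
--     level = {a}
--     for count in range(1, 20):
--         step = 2 ** (count - 1)
--         level = {q for p in level for q in (p + step, p - step) if 0 < q <= n}
--         rows.append([q in level for q in range(n + 1)])
--     return rows
-- ===== Notes on version B (the rewrite author's own statement) =====
-- stated objective: simpler
-- what changed: A runs a FIFO queue BFS with no visited/dedup check (the queue can hold ~2^19 duplicate states) and marks cells in a mutable grid; B keeps one deduplicated set of positions per jump level and builds each of the 19 rows directly from that set.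
import Mathlib
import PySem

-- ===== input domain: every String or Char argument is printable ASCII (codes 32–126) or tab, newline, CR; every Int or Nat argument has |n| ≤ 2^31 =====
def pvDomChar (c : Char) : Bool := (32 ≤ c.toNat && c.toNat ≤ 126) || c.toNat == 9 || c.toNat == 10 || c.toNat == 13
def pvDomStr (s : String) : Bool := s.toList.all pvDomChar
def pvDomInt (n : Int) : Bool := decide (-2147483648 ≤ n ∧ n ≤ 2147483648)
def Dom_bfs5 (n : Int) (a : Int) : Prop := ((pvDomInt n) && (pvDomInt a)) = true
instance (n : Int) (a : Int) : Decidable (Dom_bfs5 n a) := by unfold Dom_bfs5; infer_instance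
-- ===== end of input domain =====

-- B replaces A's unbounded BFS queue (no visited dedup) by 19 deduplicated level sets,
-- building each row directly; objective: simpler (same return value; A mutates nothing observable).

-- ===== PORT A =====
-- 2 ** e; exact since every exponent A computes is count-1 ≥ 0 (counts are 1..19 here)
def pow2A (e : Int) : Int := 2 ^ e.toNat

-- visited5[count][g] = True  (indices are always in range when A executes this)
def markA (v : List (List Bool)) (c : Int) (q : Int) : List (List Bool) :=
  PySem.List.pySetD v c (PySem.List.pySetD (PySem.List.pyGetD v c []) q true)

-- the while-loop over the deque; fuel only makes the recursion total (3^19 ≥ the weight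
-- 'sum of 3^(20-count)' of the initial queue, which strictly decreases at every pop)
def loopA (n : Int) : Nat → List (Int × Int) → List (List Bool) → List (List Bool)
  | _, [], v => v
  | 0, _, v => v
  | fuel+1, (a, count) :: rest, v =>
    if count = 20 then loopA n fuel rest v
    else
      let g0 := a + pow2A (count - 1)
      let g1 := a - pow2A (count - 1)
      -- i = 0
      let p1 : List (Int × Int) × List (List Bool) :=
        if g0 ≤ n ∧ 0 < g0 then (rest ++ [(g0, count+1)], markA v count g0) else (rest, v)
      -- i = 1
      let p2 : List (Int × Int) × List (List Bool) :=
        if g1 ≤ n ∧ 0 < g1 then (p1.1 ++ [(g1, count+1)], markA p1.2 count g1) else p1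
      loopA n fuel p2.1 p2.2

def bfs5 (n : Int) (a : Int) : List (List Bool) :=
  loopA n (3 ^ 19) [(a, 1)]
    ((PySem.List.pyRange 0 20 1).map (fun _ => (PySem.List.pyRange 0 (n+1) 1).map (fun _ => false)))

-- ===== PORT B =====
def pow2B (e : Int) : Int := 2 ^ e.toNat  -- 2 ** (count-1), count-1 ≥ 0 for count in range(1,20)

def inbB (n : Int) (q : Int) : Bool := decide (0 < q) && decide (q ≤ n)

-- one iteration of 'for count in range(1, 20)': new level set, append its row
def stepB (n : Int) (st : List (List Bool) × PySem.Set Int) (count : Int) :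
    List (List Bool) × PySem.Set Int :=
  let step := pow2B (count - 1)
  let level : PySem.Set Int :=
    PySem.Set.ofList ((st.2.flatMap (fun p => [p + step, p - step])).filter (inbB n))
  (st.1 ++ [(PySem.List.pyRange 0 (n+1) 1).map (fun q => PySem.Set.contains level q)], level)

def bfs5_alt (n : Int) (a : Int) : List (List Bool) :=
  let row0 : List Bool := (PySem.List.pyRange 0 (n+1) 1).map (fun _ => false)
  ((PySem.List.pyRange 1 20 1).foldl (stepB n) ([row0], PySem.Set.ofList [a])).1

-- ===== PRECONDITION & SPEC =====
def Spec_bfs5 (n : Int) (a : Int) (out : List (List Bool)) : Prop := out = bfs5_alt n a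
instance (n : Int) (a : Int) (out : List (List Bool)) : Decidable (Spec_bfs5 n a out) := by unfold Spec_bfs5; infer_instance

-- ===== CLAIM (what is proved, stated in full; the proofs are below) =====
def Claim_equal_bfs5 : Prop := ∀ (n : Int) (a : Int), Dom_bfs5 n a → Spec_bfs5 n a (bfs5 n a)

-- ===== LEMMAS AND PROOFS =====

-- grid of R rows × C columns given by f
def gridOf (R C : Nat) (f : Nat → Nat → Bool) : List (List Bool) :=
  (List.range R).map (fun i => (List.range C).map (f i))

-- level sets: positions reachable in exactly t jumps from p, jump sizes 2^e, 2^(e+1), …,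
-- clipped to (0, n] after every jump
def lvP (n : Int) (p : Int) (e : Nat) : Nat → List Int
  | 0 => [p]
  | t+1 => ((lvP n p e t).flatMap (fun x => [x + 2 ^ (e + t), x - 2 ^ (e + t)])).filter
      (fun q => decide (0 < q) && decide (q ≤ n))

-- the marks one popped entry (p, c) performs immediately
def cmE (n : Int) (p c : Int) : List (Int × Int) :=
  (if p + pow2A (c-1) ≤ n ∧ 0 < p + pow2A (c-1) then [(c, p + pow2A (c-1))] else []) ++
  (if p - pow2A (c-1) ≤ n ∧ 0 < p - pow2A (c-1) then [(c, p - pow2A (c-1))] else [])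

-- the entries one popped entry (p, c) enqueues
def chE (n : Int) (p c : Int) : List (Int × Int) :=
  (if p + pow2A (c-1) ≤ n ∧ 0 < p + pow2A (c-1) then [(p + pow2A (c-1), c+1)] else []) ++
  (if p - pow2A (c-1) ≤ n ∧ 0 < p - pow2A (c-1) then [(p - pow2A (c-1), c+1)] else [])

-- all marks the expansion of (p, c) ever performs (gas = 20 - c)
def emG (n : Int) : Nat → Int → Int → List (Int × Int)
  | 0, _, _ => []
  | g+1, p, c => cmE n p c ++ (chE n p c).flatMap (fun e => emG n g e.1 e.2)

theorem lvP_succ (n p : Int) (e t : Nat) :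
    lvP n p e (t+1) = ((lvP n p e t).flatMap (fun x => [x + 2 ^ (e + t), x - 2 ^ (e + t)])).filter
      (fun q => decide (0 < q) && decide (q ≤ n)) := rfl

def applyM (ms : List (Int × Int)) (v : List (List Bool)) : List (List Bool) :=
  ms.foldl (fun v m => markA v m.1 m.2) v

def wt (queue : List (Int × Int)) : Nat := (queue.map (fun e => 3 ^ (20 - e.2).toNat)).sum

def natMark (v : List (List Bool)) (i j : Nat) : List (List Bool) :=
  v.set i ((v.getD i []).set j true)

theorem markA_eq_natMark (v : List (List Bool)) (c q : Int) (hc : 0 ≤ c) (hq : 0 ≤ q) :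
    markA v c q = natMark v c.toNat q.toNat := by
  unfold markA natMark
  rw [PySem.List.pyGetD_of_nonneg v [] hc,
      PySem.List.pySetD_of_nonneg (v.getD c.toNat []) true hq,
      PySem.List.pySetD_of_nonneg v _ hc]

theorem natMark_comm (v : List (List Bool)) (i j i' j' : Nat) :
    natMark (natMark v i j) i' j' = natMark (natMark v i' j') i j := by
  unfold natMark
  by_cases hii : i = i'
  · subst hii
    by_cases hi : i < v.length
    · have h1 : (v.set i ((v.getD i []).set j true)).getD i []
          = (v.getD i []).set j true := by
        simp [List.getD_eq_getElem?_getD, List.getElem?_set_self, hi]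
      have h2 : (v.set i ((v.getD i []).set j' true)).getD i []
          = (v.getD i []).set j' true := by
        simp [List.getD_eq_getElem?_getD, List.getElem?_set_self, hi]
      rw [h1, h2, List.set_set, List.set_set]
      by_cases hjj : j = j'
      · subst hjj; rfl
      · rw [List.set_comm _ _ hjj]
    · have hle : v.length ≤ i := Nat.le_of_not_lt hi
      simp only [List.set_eq_of_length_le hle]
  · have h1 : (v.set i ((v.getD i []).set j true)).getD i' []
        = v.getD i' [] := by
      simp [List.getD_eq_getElem?_getD, List.getElem?_set_ne hii]
    have h2 : (v.set i' ((v.getD i' []).set j' true)).getD i []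
        = v.getD i [] := by
      simp [List.getD_eq_getElem?_getD, List.getElem?_set_ne (Ne.symm hii)]
    rw [h1, h2, List.set_comm _ _ hii]

theorem applyM_perm (ms ms' : List (Int × Int)) (h : ms.Perm ms')
    (hg : ∀ m ∈ ms, 0 ≤ m.1 ∧ 0 ≤ m.2) (v : List (List Bool)) :
    applyM ms v = applyM ms' v := by
  induction h generalizing v with
  | nil => rfl
  | cons x _ ih =>
      simp only [applyM, List.foldl_cons] at *
      exact ih (fun m hm => hg m (List.mem_cons_of_mem x hm)) _
  | swap x y _ =>
      simp only [applyM, List.foldl_cons]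
      have hx := hg x (by simp)
      have hy := hg y (by simp)
      rw [markA_eq_natMark _ _ _ hy.1 hy.2, markA_eq_natMark _ _ _ hx.1 hx.2,
          markA_eq_natMark _ _ _ hx.1 hx.2, markA_eq_natMark _ _ _ hy.1 hy.2,
          natMark_comm]
  | trans h12 _ ih1 ih2 =>
      rw [ih1 hg, ih2 (fun m hm => hg m (h12.mem_iff.mpr hm))]

theorem set_map_range {α : Type} (C : Nat) (g : Nat → α) (j : Nat) (x : α) :
    ((List.range C).map g).set j x = (List.range C).map (fun m => if m = j then x else g m) := by
  apply List.ext_getElem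
  · simp
  · intro m hm1 hm2
    simp only [List.length_set, List.length_map, List.length_range] at hm1
    rw [List.getElem_set]
    simp only [List.getElem_map, List.getElem_range]
    split_ifs with h1 h2 h3 <;> first | rfl | omega

theorem gridOf_congr (R C : Nat) (f g : Nat → Nat → Bool)
    (h : ∀ i < R, ∀ j < C, f i j = g i j) : gridOf R C f = gridOf R C g := by
  unfold gridOf
  refine List.map_congr_left (fun i hi => ?_)
  refine List.map_congr_left (fun j hj => ?_)
  exact h i (List.mem_range.mp hi) j (List.mem_range.mp hj)


theorem natMark_gridOf (R C : Nat) (f : Nat → Nat → Bool) (i j : Nat) :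
    natMark (gridOf R C f) i j
      = gridOf R C (fun i' j' => if i' = i ∧ j' = j then true else f i' j') := by
  unfold natMark gridOf
  by_cases hi : i < R
  · have hgetD : ((List.range R).map (fun i => (List.range C).map (f i))).getD i []
        = (List.range C).map (f i) := by
      simp [List.getD_eq_getElem?_getD, List.getElem?_map, List.getElem?_range, hi]
    rw [hgetD, set_map_range, set_map_range]
    refine List.map_congr_left fun i' _ => ?_
    by_cases hii : i' = i
    · subst hii
      rw [if_pos rfl]
      refine List.map_congr_left fun j' _ => ?_
      by_cases hjj : j' = j <;> simp [hjj]
    · simp only [if_neg hii]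
      refine List.map_congr_left fun j' _ => ?_
      simp [hii]
  · have hle : ((List.range R).map (fun i => (List.range C).map (f i))).length ≤ i := by
      simpa using Nat.le_of_not_lt hi
    rw [List.set_eq_of_length_le hle]
    refine List.map_congr_left fun i' hi' => ?_
    refine List.map_congr_left fun j' _ => ?_
    have : i' ≠ i := by
      have := List.mem_range.mp hi'; omega
    simp [this]

theorem applyM_gridOf (R C : Nat) (ms : List (Int × Int)) (f : Nat → Nat → Bool)
    (hg : ∀ m ∈ ms, 0 ≤ m.1 ∧ 0 ≤ m.2) :
    applyM ms (gridOf R C f)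
      = gridOf R C (fun i j => f i j || decide (((i : Int), (j : Int)) ∈ ms)) := by
  induction ms generalizing f with
  | nil => simp [applyM]
  | cons m ms ih =>
      obtain ⟨c, q⟩ := m
      have hm := hg (c, q) (by simp)
      simp only [applyM, List.foldl_cons] at *
      rw [markA_eq_natMark _ _ _ hm.1 hm.2, natMark_gridOf,
          ih (hg := fun m hm => hg m (List.mem_cons_of_mem _ hm))]
      apply gridOf_congr
      intro i _ j _
      have hiff : ((i : Int) = c ∧ (j : Int) = q) ↔ (i = c.toNat ∧ j = q.toNat) := by
        omega
      by_cases hcq : i = c.toNat ∧ j = q.toNat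
      · have hpair : ((i : Int), (j : Int)) = ((c : Int), q) := by
          have h2 := hiff.mpr hcq
          simp [Prod.ext_iff, h2.1, h2.2]
        simp [hcq, hpair]
        exact Or.inr (Or.inl hm)
      · have : ¬ ((i : Int), (j : Int)) = (c, q) := by
          simp only [Prod.mk.injEq]
          exact fun h => hcq (hiff.mp h)
        simp [hcq, this]

theorem emG_good (n : Int) : ∀ (g : Nat) (p c : Int), 1 ≤ c →
    ∀ m ∈ emG n g p c, 0 ≤ m.1 ∧ 0 ≤ m.2 := by
  intro g
  induction g with
  | zero => intro p c _ m hm; simp [emG] at hm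
  | succ g ih =>
      intro p c hc m hm
      simp only [emG, List.mem_append, List.mem_flatMap] at hm
      rcases hm with hm | ⟨e, he, hm⟩
      · unfold cmE at hm
        simp only [List.mem_append] at hm
        rcases hm with hm | hm <;>
          (split_ifs at hm with h <;> simp_all <;> omega)
      · have he2 : e.2 = c + 1 ∧ 1 ≤ c + 1 := by
          unfold chE at he
          simp only [List.mem_append] at he
          constructor
          · rcases he with he | he <;> (split_ifs at he <;> simp_all)
          · omega
        have := ih e.1 e.2 (he2.1 ▸ he2.2) m (by rwa [he2.1] at hm ⊢)
        exact this

theorem flatMap_congr_mem {α β : Type} (l : List α) (f g : α → List β)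
    (h : ∀ e ∈ l, f e = g e) : l.flatMap f = l.flatMap g := by
  rw [List.flatMap_def, List.flatMap_def, List.map_congr_left h]

theorem applyM_append (xs ys : List (Int × Int)) (v : List (List Bool)) :
    applyM (xs ++ ys) v = applyM ys (applyM xs v) := List.foldl_append ..

theorem loopA_step (n : Int) (fuel : Nat) (p c : Int) (rest : List (Int × Int))
    (v : List (List Bool)) (hc : c ≠ 20) :
    loopA n (fuel+1) ((p,c)::rest) v
      = loopA n fuel (rest ++ chE n p c) (applyM (cmE n p c) v) := by
  simp only [loopA, if_neg hc, chE, cmE, applyM]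
  split_ifs with h0 h1 h1 <;> simp

theorem wt_append (xs ys : List (Int × Int)) : wt (xs ++ ys) = wt xs + wt ys := by
  simp [wt]

theorem mem_chE (n p c : Int) (e : Int × Int) (he : e ∈ chE n p c) :
    e.2 = c + 1 ∧ 0 < e.1 ∧ e.1 ≤ n := by
  unfold chE at he
  simp only [List.mem_append] at he
  rcases he with he | he <;> (split_ifs at he with h <;> simp_all)

theorem mem_cmE (n p c : Int) (m : Int × Int) (hm : m ∈ cmE n p c) :
    m.1 = c ∧ 0 < m.2 ∧ m.2 ≤ n := by
  unfold cmE at hm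
  simp only [List.mem_append] at hm
  rcases hm with hm | hm <;> (split_ifs at hm with h <;> simp_all)

theorem loopA_eq (n : Int) : ∀ (fuel : Nat) (queue : List (Int × Int)) (v : List (List Bool)),
    (∀ e ∈ queue, 1 ≤ e.2 ∧ e.2 ≤ 20) → wt queue ≤ fuel →
    loopA n fuel queue v = applyM (queue.flatMap (fun e => emG n (20 - e.2).toNat e.1 e.2)) v := by
  intro fuel
  induction fuel with
  | zero =>
      intro queue v hcnt hwt
      match queue with
      | [] => rfl
      | e :: rest =>
          exfalso
          have : 1 ≤ wt (e :: rest) := by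
            have : 1 ≤ 3 ^ (20 - e.2).toNat := Nat.one_le_pow _ _ (by norm_num)
            simp [wt]; omega
          omega
  | succ fuel ih =>
      intro queue v hcnt hwt
      match queue with
      | [] => rfl
      | (p, c) :: rest =>
          have hc := hcnt (p, c) (by simp)
          simp only at hc
          by_cases hc20 : c = 20
          · subst hc20
            show loopA n (fuel+1) ((p, 20) :: rest) v = _
            have hstep : loopA n (fuel+1) ((p,(20:Int))::rest) v = loopA n fuel rest v := by
              simp [loopA]
            have hsplit : wt ((p, (20:Int)) :: rest) = 1 + wt rest := by
              simp [wt]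
            rw [hsplit] at hwt
            rw [hstep, ih rest v (fun e he => hcnt e (List.mem_cons_of_mem _ he)) (by omega)]
            simp [emG]
          · -- 1 ≤ c ≤ 19
            have hc19 : c ≤ 19 := by omega
            have hk : (20 - c).toNat = (19 - c).toNat + 1 := by omega
            have hk2 : (20 - (c+1)).toNat = (19 - c).toNat := by omega
            rw [loopA_step n fuel p c rest v hc20]
            -- weight bookkeeping
            have hwtch : wt (chE n p c) ≤ 2 * 3 ^ (19 - c).toNat := by
              unfold chE
              split_ifs <;> simp [wt, wt_append, hk2] <;> omega
            have hwt' : wt (rest ++ chE n p c) ≤ fuel := by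
              rw [wt_append]
              have h3 : 3 ^ ((19 - c).toNat + 1) = 3 * 3 ^ (19 - c).toNat := by ring
              have hone : 1 ≤ 3 ^ (19 - c).toNat := Nat.one_le_pow _ _ (by norm_num)
              have hsplit : wt ((p, c) :: rest) = 3 ^ (20 - c).toNat + wt rest := by
                simp [wt]
              rw [hsplit, hk, h3] at hwt
              omega
            have hcnt' : ∀ e ∈ rest ++ chE n p c, 1 ≤ e.2 ∧ e.2 ≤ 20 := by
              intro e he
              rcases List.mem_append.mp he with he | he
              · exact hcnt e (List.mem_cons_of_mem _ he)
              · have := (mem_chE n p c e he).1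
                omega
            rw [ih _ _ hcnt' hwt']
            -- now pure mark-list reasoning
            rw [List.flatMap_cons, List.flatMap_append]
            have hflatch : (chE n p c).flatMap (fun e => emG n (20 - e.2).toNat e.1 e.2)
                = (chE n p c).flatMap (fun e => emG n ((19 - c).toNat) e.1 e.2) := by
              apply flatMap_congr_mem
              intro e he
              rw [(mem_chE n p c e he).1, hk2]
            rw [hflatch, hk]
            show applyM _ _ = applyM (emG n ((19 - c).toNat + 1) p c ++ _) v
            rw [show emG n ((19 - c).toNat + 1) p c
                  = cmE n p c ++ (chE n p c).flatMap (fun e => emG n ((19 - c).toNat) e.1 e.2)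
                from rfl]
            rw [applyM_append, applyM_append, ← applyM_append]
            -- LHS: applyM (cmE ++ flatMap rest) then flatMap chE; make both one applyM
            rw [← applyM_append, ← applyM_append]
            apply applyM_perm
            · -- (cmE ++ rest-marks) ++ chE-marks ~ (cmE ++ chE-marks) ++ rest-marks
              simp only [List.append_assoc]
              exact List.Perm.append_left _ List.perm_append_comm
            · intro m hm
              simp only [List.append_assoc, List.mem_append, List.mem_flatMap] at hm
              rcases hm with hm | ⟨e, he, hm⟩ | ⟨e, he, hm⟩
              · have := mem_cmE n p c m hm
                omega
              · have h1 := (hcnt e (List.mem_cons_of_mem _ he)).1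
                exact emG_good n _ e.1 e.2 h1 m hm
              · have h1 := (mem_chE n p c e he).1
                exact emG_good n _ e.1 e.2 (by omega) m hm
  

theorem lvP_front (n : Int) : ∀ (t : Nat) (p : Int) (e : Nat) (j : Int),
    j ∈ lvP n p e (t+1) ↔ ∃ q ∈ lvP n p e 1, j ∈ lvP n q (e+1) t := by
  intro t
  induction t with
  | zero =>
      intro p e j
      constructor
      · intro h; exact ⟨j, h, by simp [lvP]⟩
      · rintro ⟨q, hq, hj⟩
        simp only [lvP, List.mem_singleton] at hj
        exact hj ▸ hq
  | succ t ih =>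
      intro p e j
      have harr : e + (t + 1) = (e + 1) + t := by omega
      constructor
      · intro h
        rw [lvP_succ n p e (t+1)] at h
        simp only [List.mem_filter, List.mem_flatMap] at h
        obtain ⟨⟨x, hx, hjx⟩, hb⟩ := h
        obtain ⟨q, hq, hxq⟩ := (ih p e x).mp hx
        refine ⟨q, hq, ?_⟩
        rw [lvP_succ n q (e+1) t]
        simp only [List.mem_filter, List.mem_flatMap]
        exact ⟨⟨x, hxq, by rw [← harr]; exact hjx⟩, hb⟩
      · rintro ⟨q, hq, hj⟩
        rw [lvP_succ n q (e+1) t] at hj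
        simp only [List.mem_filter, List.mem_flatMap] at hj
        obtain ⟨⟨x, hx, hjx⟩, hb⟩ := hj
        rw [lvP_succ n p e (t+1)]
        simp only [List.mem_filter, List.mem_flatMap]
        exact ⟨⟨x, (ih p e x).mpr ⟨q, hq, hx⟩, by rw [harr]; exact hjx⟩, hb⟩

theorem mem_emG (n : Int) : ∀ (g : Nat), g ≤ 19 → ∀ (p c : Int), c = 20 - (g : Int) →
    ∀ (i j : Int), ((i, j) ∈ emG n g p c ↔
      ∃ t : Nat, t < g ∧ i = c + (t : Int) ∧ j ∈ lvP n p (c-1).toNat (t+1)) := by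
  intro g
  induction g with
  | zero => intro _ p c _ i j; simp [emG]
  | succ g ih =>
      intro hg p c hc i j
      have hc1 : (1 : Int) ≤ c := by omega
      have hmem_ite : ∀ (P : Prop) (inst : Decidable P) (x y : Int × Int),
          (x ∈ (if P then [y] else [] : List (Int × Int))) ↔ (P ∧ x = y) := by
        intro P inst x y
        split_ifs with hP <;> simp [hP]
      have hlv1 : ∀ j : Int, (j ∈ lvP n p (c-1).toNat 1 ↔
          ((j = p + pow2A (c-1) ∨ j = p - pow2A (c-1)) ∧ (0 < j ∧ j ≤ n))) := by
        intro j
        rw [lvP_succ n p (c-1).toNat 0]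
        simp [lvP, pow2A, List.mem_filter, and_assoc]
      have hcm : ∀ (i j : Int), ((i, j) ∈ cmE n p c ↔ i = c ∧ j ∈ lvP n p (c-1).toNat 1) := by
        intro i j
        unfold cmE
        rw [List.mem_append, hmem_ite _ _ _ _, hmem_ite _ _ _ _, hlv1]
        constructor
        · rintro (⟨h0, he⟩ | ⟨h1, he⟩) <;> (rw [Prod.mk.injEq] at he; obtain ⟨hi, hj⟩ := he)
          · exact ⟨hi, Or.inl hj, hj ▸ h0.2, hj ▸ h0.1⟩
          · exact ⟨hi, Or.inr hj, hj ▸ h1.2, hj ▸ h1.1⟩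
        · rintro ⟨hi, hj | hj, hb1, hb2⟩
          · exact Or.inl ⟨⟨hj ▸ hb2, hj ▸ hb1⟩, by rw [Prod.mk.injEq]; exact ⟨hi, hj⟩⟩
          · exact Or.inr ⟨⟨hj ▸ hb2, hj ▸ hb1⟩, by rw [Prod.mk.injEq]; exact ⟨hi, hj⟩⟩
      have hch : ∀ (e : Int × Int), (e ∈ chE n p c ↔ e.2 = c + 1 ∧ e.1 ∈ lvP n p (c-1).toNat 1) := by
        rintro ⟨e1, e2⟩
        unfold chE
        rw [List.mem_append, hmem_ite _ _ _ _, hmem_ite _ _ _ _, hlv1]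
        constructor
        · rintro (⟨h0, he⟩ | ⟨h1, he⟩) <;> (rw [Prod.mk.injEq] at he; obtain ⟨h1', h2'⟩ := he)
          · exact ⟨h2', Or.inl h1', h1' ▸ h0.2, h1' ▸ h0.1⟩
          · exact ⟨h2', Or.inr h1', h1' ▸ h1.2, h1' ▸ h1.1⟩
        · rintro ⟨h2', h1' | h1', hb1, hb2⟩
          · exact Or.inl ⟨⟨h1' ▸ hb2, h1' ▸ hb1⟩, by rw [Prod.mk.injEq]; exact ⟨h1', h2'⟩⟩
          · exact Or.inr ⟨⟨h1' ▸ hb2, h1' ▸ hb1⟩, by rw [Prod.mk.injEq]; exact ⟨h1', h2'⟩⟩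
      have hnat : c.toNat = (c-1).toNat + 1 := by omega
      constructor
      · intro h
        simp only [emG, List.mem_append, List.mem_flatMap] at h
        rcases h with h | ⟨e, he, hm⟩
        · exact ⟨0, by omega, by simpa using (hcm i j).mp h⟩
        · obtain ⟨he2, he1⟩ := (hch e).mp he
          have := (ih (by omega) e.1 e.2 (by omega) i j).mp (by rwa [he2] at hm ⊢)
          obtain ⟨t, ht, hit, hjt⟩ := this
          rw [he2] at hit hjt
          refine ⟨t + 1, by omega, by push_cast; omega, ?_⟩
          have : (c + 1 - 1).toNat = (c-1).toNat + 1 := by omega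
          rw [this] at hjt
          exact (lvP_front n (t+1) p (c-1).toNat j).mpr ⟨e.1, he1, hjt⟩
      · rintro ⟨t, ht, hit, hjt⟩
        simp only [emG, List.mem_append, List.mem_flatMap]
        match t with
        | 0 =>
            left
            exact (hcm i j).mpr ⟨by simpa using hit, by simpa using hjt⟩
        | t + 1 =>
            right
            obtain ⟨q, hq, hjq⟩ := (lvP_front n (t+1) p (c-1).toNat j).mp hjt
            refine ⟨(q, c+1), (hch (q, c+1)).mpr ⟨rfl, hq⟩, ?_⟩
            apply (ih (by omega) q (c+1) (by omega) i j).mpr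
            refine ⟨t, by omega, by push_cast at hit ⊢; omega, ?_⟩
            have : (c + 1 - 1).toNat = (c-1).toNat + 1 := by omega
            rw [this]
            exact hjq

theorem bfs5_eq_grid (n a : Int) :
    bfs5 n a = gridOf 20 (n+1).toNat
      (fun i j => decide (((i : Int), (j : Int)) ∈ emG n 19 a 1)) := by
  unfold bfs5
  have hrow : (PySem.List.pyRange 0 (n+1) 1).map (fun _ => false)
      = (List.range (n+1).toNat).map (fun _ => false) := by
    rw [PySem.List.pyRange_one]
    simp [List.map_map, Function.comp]
  have hinit : (PySem.List.pyRange 0 20 1).map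
        (fun _ => (PySem.List.pyRange 0 (n+1) 1).map (fun _ => false))
      = gridOf 20 (n+1).toNat (fun _ _ => false) := by
    simp [gridOf, PySem.List.pyRange_one, List.map_map, Function.comp_def]
  rw [hinit]
  rw [loopA_eq n (3^19) [(a,1)] _ (by intro e he; simp at he; simp [he]) (by simp [wt])]
  have hflat : ([((a : Int), (1 : Int))].flatMap (fun e => emG n (20 - e.2).toNat e.1 e.2))
      = emG n 19 a 1 := by
    simp
  rw [hflat, applyM_gridOf _ _ _ _ (emG_good n 19 a 1 (by norm_num))]
  apply gridOf_congr
  intro i _ j _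
  simp

theorem bfs5_alt_eq_grid (n a : Int) :
    bfs5_alt n a = gridOf 20 (n+1).toNat
      (fun i j => decide (1 ≤ i ∧ (j : Int) ∈ lvP n a 0 i)) := by
  have key : ∀ m : Nat, m ≤ 19 →
      ∃ L : PySem.Set Int,
        ((PySem.List.pyRange 1 (1 + (m : Int)) 1).foldl (stepB n)
            ([(PySem.List.pyRange 0 (n+1) 1).map (fun _ => false)], PySem.Set.ofList [a]))
          = ((List.range (m+1)).map (fun i => (List.range (n+1).toNat).map
              (fun (j : Nat) => decide (1 ≤ i ∧ (j : Int) ∈ lvP n a 0 i))), L)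
        ∧ (∀ x : Int, x ∈ L ↔ x ∈ lvP n a 0 m) := by
    intro m
    induction m with
    | zero =>
        intro _
        refine ⟨PySem.Set.ofList [a], ?_, ?_⟩
        · rw [show PySem.List.pyRange 1 (1 + ((0:Nat):Int)) 1 = []
              from PySem.List.pyRange_one_eq_nil (by norm_num)]
          simp only [List.foldl_nil, Prod.mk.injEq]
          refine ⟨?_, trivial⟩
          simp [PySem.List.pyRange_one, List.map_map, Function.comp_def, List.range_succ]
        · intro x; simp [PySem.Set.mem_ofList, lvP]
    | succ m ih =>
        intro hm
        obtain ⟨L, hfold, hL⟩ := ih (by omega)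
        have hsplit : (1 : Int) + (↑(m+1) : Int) = (1 + (m : Int)) + 1 := by push_cast; ring
        rw [hsplit, show PySem.List.pyRange 1 ((1 + (m:Int)) + 1) 1
              = PySem.List.pyRange 1 (1 + (m:Int)) 1 ++ [1 + (m:Int)]
            from PySem.List.pyRange_one_succ_right (by omega), List.foldl_append, hfold]
        simp only [List.foldl_cons, List.foldl_nil, stepB]
        have hstep : ((1 : Int) + (m : Int) - 1).toNat = m := by omega
        set newL := PySem.Set.ofList
          ((L.flatMap (fun p => [p + pow2B (1 + (m:Int) - 1), p - pow2B (1 + (m:Int) - 1)])).filter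
            (inbB n)) with hnewL
        have hmemL : ∀ x : Int, x ∈ newL ↔ x ∈ lvP n a 0 (m+1) := by
          intro x
          rw [hnewL, PySem.Set.mem_ofList, lvP_succ n a 0 m]
          simp only [List.mem_filter, List.mem_flatMap, inbB]
          constructor
          · rintro ⟨⟨p, hp, hx⟩, hb⟩
            refine ⟨⟨p, (hL p).mp hp, ?_⟩, hb⟩
            simpa [pow2B, hstep] using hx
          · rintro ⟨⟨p, hp, hx⟩, hb⟩
            refine ⟨⟨p, (hL p).mpr hp, ?_⟩, hb⟩
            simpa [pow2B, hstep] using hx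
        refine ⟨newL, ?_, hmemL⟩
        rw [Prod.mk.injEq]
        refine ⟨?_, rfl⟩
        rw [List.range_succ (n := m+1)]
        simp only [List.map_append, List.map_cons, List.map_nil]
        congr 1
        congr 1
        rw [PySem.List.pyRange_one]
        simp only [List.map_map, Function.comp_def, sub_zero]
        apply List.map_congr_left
        intro k _
        rw [Bool.eq_iff_iff]
        have h1m : 1 ≤ m + 1 := by omega
        simp [PySem.Set.contains_iff, hmemL, h1m]
  obtain ⟨L, hfold, _⟩ := key 19 (by norm_num)
  show ((PySem.List.pyRange 1 20 1).foldl (stepB n)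
      ([(PySem.List.pyRange 0 (n+1) 1).map (fun _ => false)], PySem.Set.ofList [a])).1 = _
  rw [show (20 : Int) = 1 + ((19 : Nat) : Int) from by norm_num, hfold]
  rfl

-- ===== VERDICT (by name: the statement is the Claim_ definition above) =====
theorem bfs5_spec : Claim_equal_bfs5 := by
  intro n a _
  unfold Spec_bfs5
  rw [bfs5_eq_grid, bfs5_alt_eq_grid]
  apply gridOf_congr
  intro i hi j hj
  have hiff := mem_emG n 19 (by norm_num) a 1 (by norm_num) (i : Int) (j : Int)
  have h0 : ((1 : Int) - 1).toNat = 0 := rfl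
  rw [h0] at hiff
  rw [Bool.eq_iff_iff]
  simp only [decide_eq_true_eq]
  rw [hiff]
  constructor
  · rintro ⟨t, ht, hit, hj'⟩
    have hi1 : i = t + 1 := by omega
    exact ⟨by omega, by rw [hi1]; exact hj'⟩
  · rintro ⟨h1, hj'⟩
    refine ⟨i - 1, by omega, by omega, ?_⟩
    rw [show i - 1 + 1 = i from by omega]
    exact hj'
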